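-- pv_equiv track=rewrite | github.com/cpaszul/advent-of-code-2021 | day15.py | get_risk
-- ===== SOURCE A (Python) =====
-- def get_risk(grid: list[list[int]], x: int, y: int) -> int:
--     x_base = x % 100
--     x_mod = x // 100
--     y_base = y % 100
--     y_mod = y // 100
--     val = grid[y_base][x_base] + x_mod + y_mod
--     while val > 9:
--         val -= 9
--     return val
-- ===== SOURCE B (Python) =====
-- def _wrap(v: int) -> int:
--     return (v - 1) % 9 + 1 if v > 9 else v
--
-- def get_risk(grid: list[list[int]], x: int, y: int) -> int:
--     y_mod, y_base = divmod(y, 100)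
--     x_mod, x_base = divmod(x, 100)
--     return _wrap(grid[y_base][x_base] + x_mod + y_mod)
-- ===== Notes on version B (the rewrite author's own statement) =====
-- stated objective: idiomatic
-- what changed: A's iterative 'while val > 9: val -= 9' reduction is replaced by a guarded closed-form modular wrap helper ((val-1) % 9 + 1 when val > 9), and the two '%'/'//' pairs are computed in one step each with divmod.
import Mathlib
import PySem

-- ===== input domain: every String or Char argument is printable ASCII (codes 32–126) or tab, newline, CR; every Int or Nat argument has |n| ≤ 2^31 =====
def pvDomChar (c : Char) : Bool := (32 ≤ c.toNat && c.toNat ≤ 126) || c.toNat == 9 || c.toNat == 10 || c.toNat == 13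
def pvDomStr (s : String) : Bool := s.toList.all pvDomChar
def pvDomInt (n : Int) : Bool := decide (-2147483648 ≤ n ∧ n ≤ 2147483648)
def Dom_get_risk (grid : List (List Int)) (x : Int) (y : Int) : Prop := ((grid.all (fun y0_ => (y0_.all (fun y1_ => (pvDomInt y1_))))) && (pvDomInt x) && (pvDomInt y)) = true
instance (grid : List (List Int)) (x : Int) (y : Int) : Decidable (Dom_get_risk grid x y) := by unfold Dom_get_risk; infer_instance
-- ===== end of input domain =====

-- B replaces A's iterative wrap loop by a guarded closed-form modular wrap helper, and
-- computes each quotient/remainder pair in one divmod step (idiomatic, constant-time wrap).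

-- ===== PORT A =====
-- 'while val > 9: val -= 9', step for step; terminates because val decreases while > 9
def getRiskWrapLoop (val : Int) : Int :=
  if val > 9 then getRiskWrapLoop (val - 9) else val
termination_by val.toNat
decreasing_by omega

-- grid[y_base][x_base]: indices are Python '% 100' results, hence ≥ 0; Pre_ excludes the
-- out-of-range (IndexError) inputs, so the '.getD 0' default is never the value used.
def get_risk (grid : List (List Int)) (x : Int) (y : Int) : Int :=
  let x_base := PySem.Int.mod x 100
  let x_mod := PySem.Int.floordiv x 100
  let y_base := PySem.Int.mod y 100
  let y_mod := PySem.Int.floordiv y 100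
  let row := (PySem.List.pyGet? grid y_base).getD []
  let val := PySem.List.pyGetD row x_base 0 + x_mod + y_mod
  getRiskWrapLoop val

-- ===== PORT B =====
-- hand port of Python's divmod(a, b): exact for b ≠ 0 (here b = 100)
def pvDivmod (a b : Int) : Int × Int := (PySem.Int.floordiv a b, PySem.Int.mod a b)

-- '_wrap' from Source B: guarded closed-form modular wrap
def pvWrap (v : Int) : Int := if v > 9 then PySem.Int.mod (v - 1) 9 + 1 else v

def get_risk_alt (grid : List (List Int)) (x : Int) (y : Int) : Int :=
  match pvDivmod y 100, pvDivmod x 100 with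
  | (y_mod, y_base), (x_mod, x_base) =>
      pvWrap (PySem.List.pyGetD ((PySem.List.pyGet? grid y_base).getD []) x_base 0 + x_mod + y_mod)

-- ===== PRECONDITION & SPEC =====
-- Pre_ excludes exactly the inputs where Python A raises IndexError (row or column index out of range).
def Pre_get_risk (grid : List (List Int)) (x : Int) (y : Int) : Prop :=
  PySem.Int.mod y 100 < (grid.length : Int) ∧
  PySem.Int.mod x 100 < (((PySem.List.pyGet? grid (PySem.Int.mod y 100)).getD []).length : Int)
instance (grid : List (List Int)) (x : Int) (y : Int) : Decidable (Pre_get_risk grid x y) := by unfold Pre_get_risk; infer_instance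

def pvWitness_get_risk : List (List Int) × Int × Int := ([[1, 8], [9, 3]], 101, 1)

def Spec_get_risk (grid : List (List Int)) (x : Int) (y : Int) (out : Int) : Prop := out = get_risk_alt grid x y
instance (grid : List (List Int)) (x : Int) (y : Int) (out : Int) : Decidable (Spec_get_risk grid x y out) := by unfold Spec_get_risk; infer_instance

-- ===== CLAIM (what is proved, stated in full; the proofs are below) =====
def Claim_equal_get_risk : Prop := ∀ (grid : List (List Int)) (x : Int) (y : Int), Dom_get_risk grid x y → Pre_get_risk grid x y → Spec_get_risk grid x y (get_risk grid x y)

-- ===== LEMMAS AND PROOFS =====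
lemma getRiskWrapLoop_closed (val : Int) : getRiskWrapLoop val = pvWrap val := by
  unfold pvWrap
  induction val using getRiskWrapLoop.induct with
  | case1 v h ih =>
    rw [getRiskWrapLoop, if_pos h, ih, if_pos h]
    by_cases h9 : v - 9 > 9
    · rw [if_pos h9]
      have : PySem.Int.mod (v - 9 - 1) 9 = PySem.Int.mod (v - 1) 9 := by
        rw [PySem.Int.mod_eq_emod_of_pos (by omega), PySem.Int.mod_eq_emod_of_pos (by omega)]
        omega
      rw [this]
    · rw [if_neg h9, PySem.Int.mod_eq_emod_of_pos (by omega)]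
      have : (v - 1) % 9 = v - 10 := by
        have := Int.emod_eq_of_lt (show (0:Int) ≤ v - 10 by omega) (show v - 10 < 9 by omega)
        omega
      omega
  | case2 v h =>
    rw [getRiskWrapLoop, if_neg h, if_neg h]

-- ===== VERDICT (by name: the statement is the Claim_ definition above) =====
theorem get_risk_spec : Claim_equal_get_risk := by
  intro grid x y _ _
  unfold Spec_get_risk get_risk get_risk_alt pvDivmod
  simp only [getRiskWrapLoop_closed]
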